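-- pv_equiv track=rewrite | github.com/dimagi/commcare-cloud | src/commcare_cloud/commands/ansible/service.py | get_managed_service_options
-- ===== SOURCE A (Python) =====
-- from collections import defaultdict, OrderedDict
--
-- def get_managed_service_options(process_descriptors):
--     """
--     :param process_descriptors: List of ``ProcessDescriptor`` tuples
--     :return:
--     """
--     options = defaultdict(set)
--     for host, short_name, number, full_name in process_descriptors:
--         options[short_name].add(number)
--     return sorted([
--         '{}{}'.format(name, ':[0-{}]'.format(max(numbers)) if len(numbers) > 1 else '')
--         for name, numbers in options.items()
--     ])
-- ===== SOURCE B (Python) =====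
-- def get_managed_service_options(process_descriptors):
--     """
--     :param process_descriptors: List of ``ProcessDescriptor`` tuples
--     :return:
--     """
--     names = dict.fromkeys(d[1] for d in process_descriptors)
--
--     def fmt(name):
--         nums = {d[2] for d in process_descriptors if d[1] == name}
--         return '{}:[0-{}]'.format(name, max(nums)) if len(nums) > 1 else name
--
--     return sorted(fmt(name) for name in names)
-- ===== Notes on version B (the rewrite author's own statement) =====
-- stated objective: simpler
-- what changed: Replaces the defaultdict(set) accumulation pass with a two-phase scheme: ordered-dedup the short_names once, then compute each name's distinct-number set by a direct filtering set comprehension over the input.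
import Mathlib
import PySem

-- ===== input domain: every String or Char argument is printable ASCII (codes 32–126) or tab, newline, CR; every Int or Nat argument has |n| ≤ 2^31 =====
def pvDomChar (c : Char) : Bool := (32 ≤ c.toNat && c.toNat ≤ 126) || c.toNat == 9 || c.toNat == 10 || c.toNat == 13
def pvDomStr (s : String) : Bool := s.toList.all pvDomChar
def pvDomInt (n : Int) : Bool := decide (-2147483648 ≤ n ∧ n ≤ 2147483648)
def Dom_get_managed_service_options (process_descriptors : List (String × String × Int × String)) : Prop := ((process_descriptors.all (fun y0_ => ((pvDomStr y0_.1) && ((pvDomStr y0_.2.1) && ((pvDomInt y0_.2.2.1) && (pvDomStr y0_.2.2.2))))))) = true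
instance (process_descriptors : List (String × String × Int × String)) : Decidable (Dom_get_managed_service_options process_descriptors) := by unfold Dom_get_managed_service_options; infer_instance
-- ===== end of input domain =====

-- B replaces A's one-pass defaultdict(set) grouping by an ordered dedup of the names plus a
-- per-name filtering set comprehension (simpler decomposition, not claimed faster).

-- ===== PORT A =====
-- options = defaultdict(set); for host, short_name, number, full_name in pds: options[short_name].add(number)
-- return sorted(['{}{}'.format(name, ':[0-{}]'.format(max(numbers)) if len(numbers) > 1 else '') for name, numbers in options.items()])
-- max(numbers) is guarded by len(numbers) > 1, so numbers ≠ [] there; (max?).getD 0 is max(numbers) on that branch.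
def get_managed_service_options (process_descriptors : List (String × String × Int × String)) : List String :=
  let options : PySem.Dict String (PySem.Set Int) :=
    process_descriptors.foldl (fun d e => d.modify e.2.1 [] (fun s => PySem.Set.add s e.2.2.1)) PySem.Dict.empty
  PySem.List.sorted
    (options.items.map (fun p =>
      p.1 ++ (if p.2.length > 1 then ":[0-" ++ PySem.Int.toStr ((PySem.List.max? p.2 (fun x => x)).getD 0) ++ "]" else "")))
    (fun x => x) false

-- ===== PORT B =====
-- nums = {d[2] for d in process_descriptors if d[1] == name}; max(nums) guarded by len(nums) > 1 as in A.
def pvFmtB (process_descriptors : List (String × String × Int × String)) (name : String) : String :=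
  let nums : PySem.Set Int :=
    PySem.Set.ofList ((process_descriptors.filter (fun d => d.2.1 == name)).map (fun d => d.2.2.1))
  if nums.length > 1 then
    name ++ ":[0-" ++ PySem.Int.toStr ((PySem.List.max? nums (fun x => x)).getD 0) ++ "]"
  else name

-- names = dict.fromkeys(d[1] for d in pds); return sorted(fmt(name) for name in names)
def get_managed_service_options_alt (process_descriptors : List (String × String × Int × String)) : List String :=
  PySem.List.sorted
    ((PySem.List.dedup (process_descriptors.map (fun d => d.2.1))).map (pvFmtB process_descriptors))
    (fun x => x) false

-- ===== PRECONDITION & SPEC =====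
def Spec_get_managed_service_options (process_descriptors : List (String × String × Int × String)) (out : List String) : Prop := out = get_managed_service_options_alt process_descriptors
instance (process_descriptors : List (String × String × Int × String)) (out : List String) : Decidable (Spec_get_managed_service_options process_descriptors out) := by unfold Spec_get_managed_service_options; infer_instance

-- ===== CLAIM (what is proved, stated in full; the proofs are below) =====
def Claim_equal_get_managed_service_options : Prop := ∀ (process_descriptors : List (String × String × Int × String)), Dom_get_managed_service_options process_descriptors → Spec_get_managed_service_options process_descriptors (get_managed_service_options process_descriptors)

-- ===== LEMMAS AND PROOFS =====

-- A's grouping loop, looked up at any name c: the set of numbers of the entries whose short_name is c.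
theorem pv_getD_grouploop (c : String) :
    ∀ (l : List (String × String × Int × String)) (d : PySem.Dict String (PySem.Set Int)),
      (l.foldl (fun d e => d.modify e.2.1 [] (fun s => PySem.Set.add s e.2.2.1)) d).getD c [] =
        PySem.Set.update (d.getD c []) ((l.filter (fun e => e.2.1 == c)).map (fun e => e.2.2.1)) := by
  intro l
  induction l with
  | nil => intro d; rfl
  | cons e t ih =>
      intro d
      simp only [List.foldl_cons, ih, List.filter_cons]
      by_cases h : e.2.1 = c
      · subst h
        simp [PySem.Set.update]
      · simp [PySem.Dict.getD_modify, h, Ne.symm h]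

theorem get_managed_service_options_spec : Claim_equal_get_managed_service_options := by
  intro pds _
  unfold Spec_get_managed_service_options get_managed_service_options get_managed_service_options_alt
  simp only []
  congr 1
  set step := fun (d : PySem.Dict String (PySem.Set Int)) (e : String × String × Int × String) =>
    d.modify e.2.1 [] (fun s => PySem.Set.add s e.2.2.1) with hstep
  have hnodup : (pds.foldl step PySem.Dict.empty).keys.Nodup := by
    exact PySem.Dict.nodup_keys_foldl_modify_key pds (fun e => e.2.1) []
      (fun d e => fun s => PySem.Set.add s e.2.2.1) PySem.Dict.empty PySem.Dict.nodup_keys_empty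
  have hkeys : (pds.foldl step PySem.Dict.empty).keys =
      PySem.Set.ofList (pds.map (fun e => e.2.1)) := by
    rw [hstep, PySem.Dict.keys_foldl_modify_key]
    simp [PySem.Dict.keys_empty, PySem.Set.update_nil_left]
  rw [PySem.Dict.items_eq_map_keys _ hnodup [], hkeys, List.map_map,
      PySem.List.dedup_eq_ofList]
  apply List.map_congr_left
  intro k hk
  have hget : (pds.foldl step PySem.Dict.empty).getD k [] =
      PySem.Set.ofList ((pds.filter (fun e => e.2.1 == k)).map (fun e => e.2.2.1)) := by
    rw [hstep, pv_getD_grouploop]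
    simp [PySem.Dict.getD_empty, PySem.Set.update_nil_left]
  simp only [Function.comp, hget, pvFmtB]
  split_ifs with h
  · simp [String.append_assoc]
  · simp
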